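-- pv_equiv track=rewrite | github.com/amaotone/SA-IS | sa_is.py | classify_ls
-- ===== SOURCE A (Python) =====
-- def is_lms(t, i):
--     if i == 0:
--         return t[i] == 'S'
--     else:
--         return t[i-1] == 'L' and t[i] == 'S'
--
-- def classify_ls(S):
--     t = [None] * len(S)
--     t[-1] = 'S'
--     for i in reversed(range(len(S)-1)):
--         if S[i] < S[i+1]:
--             t[i] = 'S'
--         elif S[i] > S[i+1]:
--             t[i] = 'L'
--         else:
--             t[i] = t[i+1]
--     lmss = [i for i in range(len(S)) if is_lms(t, i)]
--     return t, lmss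
-- ===== SOURCE B (Python) =====
-- def classify_ls(S):
--     if not S:
--         return [], []
--     rt = ['S']           # suffix types collected right-to-left
--     lmss = []            # LMS positions collected right-to-left
--     pos = len(S) - 1
--     for a, b in reversed(list(zip(S, S[1:]))):
--         c = 'S' if a < b else 'L' if a > b else rt[-1]
--         if c == 'L' and rt[-1] == 'S':
--             lmss.append(pos)
--         rt.append(c)
--         pos -= 1
--     if rt[-1] == 'S':
--         lmss.append(0)
--     rt.reverse()
--     lmss.reverse()
--     return rt, lmss
-- ===== Notes on version B (the rewrite author's own statement) =====
-- stated objective: alternative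
-- what changed: B fuses A's two passes (reverse type-classification loop plus a separate is_lms filter over all indices) into a single backward fold over adjacent pairs that detects each LMS position at the L-to-S transition as it is created, collecting types and LMS positions right-to-left and reversing once at the end; on the empty list, where A raises IndexError (excluded by Pre_), B returns ([], []).
import Mathlib
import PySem

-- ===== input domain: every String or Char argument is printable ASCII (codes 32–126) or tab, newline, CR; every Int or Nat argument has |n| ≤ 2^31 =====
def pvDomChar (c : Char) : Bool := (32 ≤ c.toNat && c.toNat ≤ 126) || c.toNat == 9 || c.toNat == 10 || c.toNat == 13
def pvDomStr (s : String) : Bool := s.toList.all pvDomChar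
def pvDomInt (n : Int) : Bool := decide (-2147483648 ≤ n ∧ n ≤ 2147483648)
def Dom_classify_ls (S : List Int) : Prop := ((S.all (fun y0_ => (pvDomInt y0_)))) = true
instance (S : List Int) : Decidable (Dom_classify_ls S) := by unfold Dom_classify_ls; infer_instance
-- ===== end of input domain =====

-- B fuses A's two passes (type classification + separate LMS filter) into one backward fold
-- that detects LMS positions on the fly; same O(n) cost, different decomposition.


-- ===== PORT A =====
-- the reverse loop computing t[i] from t[i+1]: each type depends only on the suffix
def classifyT : List Int → List String
  | [] => []
  | [_] => ["S"]
  | x :: y :: r =>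
      let rest := classifyT (y :: r)
      (if x < y then "S" else if x > y then "L" else rest.headD "") :: rest

-- helper is_lms(t, i); indices produced by range(len(S)) are always in range, so getD is exact
def is_lms (t : List String) (i : Int) : Bool :=
  if i = 0 then (PySem.List.pyGetD t 0 "") == "S"
  else (PySem.List.pyGetD t (i - 1) "") == "L" && (PySem.List.pyGetD t i "") == "S"

def classify_ls (S : List Int) : List String × List Int :=
  let t := classifyT S
  (t, (PySem.List.pyRange 0 (S.length : Int) 1).filter (fun i => is_lms t i))

-- ===== PORT B =====
-- one loop step: the last element of rt (never empty) is the type of the position to the right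
def altStep (st : List String × List Int × Int) (ab : Int × Int) : List String × List Int × Int :=
  let prev := PySem.List.pyGetD st.1 (-1) ""
  let c := if ab.1 < ab.2 then "S" else if ab.1 > ab.2 then "L" else prev
  (st.1 ++ [c], if c == "L" && prev == "S" then st.2.1 ++ [st.2.2] else st.2.1, st.2.2 - 1)

def classify_ls_alt (S : List Int) : List String × List Int :=
  if S = [] then ([], [])
  else
    let pairs := (S.zip (PySem.List.slice S (some 1) none)).reverse
    let st := pairs.foldl altStep (["S"], [], (S.length : Int) - 1)
    let lmss := if PySem.List.pyGetD st.1 (-1) "" == "S" then st.2.1 ++ [0] else st.2.1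
    (st.1.reverse, lmss.reverse)

-- ===== PRECONDITION & SPEC =====
-- A raises IndexError (assigning the last type) on the empty list; Pre_ excludes exactly that input.
def Pre_classify_ls (S : List Int) : Prop := S ≠ []
instance (S : List Int) : Decidable (Pre_classify_ls S) := by unfold Pre_classify_ls; infer_instance
def pvWitness_classify_ls : List Int := [0, 1]

def Spec_classify_ls (S : List Int) (out : List String × List Int) : Prop := out = classify_ls_alt S
instance (S : List Int) (out : List String × List Int) : Decidable (Spec_classify_ls S out) := by unfold Spec_classify_ls; infer_instance

-- ===== CLAIM (what is proved, stated in full; the proofs are below) =====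
def Claim_equal_classify_ls : Prop := ∀ (S : List Int), Dom_classify_ls S → Pre_classify_ls S → Spec_classify_ls S (classify_ls S)

-- ===== LEMMAS AND PROOFS =====

-- LMS positions of a type list, collected right-to-left (descending), positions ≥ 1 only
def descLMS : List String → List Int
  | [] => []
  | [_] => []
  | c :: c' :: r => (descLMS (c' :: r)).map (· + 1) ++ (if c == "L" && c' == "S" then [1] else [])

lemma classifyT_ne_nil (y : Int) (r : List Int) : classifyT (y :: r) ≠ [] := by
  cases r <;> simp [classifyT]

lemma classifyT_length (S : List Int) : (classifyT S).length = S.length := by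
  induction S with
  | nil => simp [classifyT]
  | cons x r ih =>
    cases r with
    | nil => simp [classifyT]
    | cons y r' => simp only [classifyT, List.length_cons] at ih ⊢; omega

lemma fold_inv (x : Int) (r : List Int) (e : Int) :
    ((x :: r).zip ((x :: r).tail)).reverse.foldl altStep (["S"], [], e + (r.length : Int))
      = ((classifyT (x :: r)).reverse, (descLMS (classifyT (x :: r))).map (· + e), e) := by
  induction r generalizing x e with
  | nil => simp [classifyT, descLMS]
  | cons y r' ih =>
    obtain ⟨c', rest, hT⟩ := List.exists_cons_of_ne_nil (classifyT_ne_nil y r')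
    have hzip : ((x :: y :: r').zip ((x :: y :: r').tail)).reverse
        = ((y :: r').zip ((y :: r').tail)).reverse ++ [(x, y)] := by
      simp [List.zip]
    have hpos : e + ((y :: r').length : Int) = (e + 1) + (r'.length : Int) := by
      simp only [List.length_cons]; push_cast; ring
    rw [hzip, List.foldl_append, hpos, ih y (e + 1)]
    have hprev : PySem.List.pyGetD ((classifyT (y :: r')).reverse) (-1) ""
        = (classifyT (y :: r')).headD "" := by
      rw [hT]; simp [PySem.List.pyGetD_neg_one_append_singleton]
    show altStep _ (x, y) = _
    simp only [altStep, hprev]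
    rw [hT]
    simp only [classifyT, hT, List.headD_cons, descLMS]
    simp only [Prod.mk.injEq]
    refine ⟨by simp, ?_, by omega⟩
    rw [List.map_append, List.map_map]
    have hm : (descLMS (c' :: rest)).map ((fun x => x + e) ∘ (fun x => x + 1))
        = (descLMS (c' :: rest)).map (fun x => x + (e + 1)) := by
      apply List.map_congr_left; intro a _; simp; ring
    rw [hm]
    split_ifs <;> simp [show (1 : Int) + e = e + 1 from by ring]

-- transition predicate on natural indices: position k+1 is LMS
def lmsAt (t : List String) (k : Nat) : Bool := t.getD k "" == "L" && t.getD (k + 1) "" == "S"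

lemma filter_lms_shift (c : String) (rest : List String) :
    ((List.range (c :: rest).length).filter (fun k : Nat => is_lms (c :: rest) (k : Int))).map (fun k : Nat => (k : Int))
      = (if c == "S" then [(0 : Int)] else []) ++ ((List.range rest.length).filter (lmsAt (c :: rest))).map (fun k : Nat => (k : Int) + 1) := by
  have hpt : ∀ k : Nat, is_lms (c :: rest) (((k + 1 : Nat) : Nat) : Int) = lmsAt (c :: rest) k := by
    intro k
    simp only [is_lms, lmsAt]
    rw [if_neg (by omega : ¬(((k + 1 : Nat) : Int)) = 0)]
    have h1 : (((k + 1 : Nat) : Int)) - 1 = ((k : Nat) : Int) := by push_cast; ring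
    rw [h1, PySem.List.pyGetD_natCast, PySem.List.pyGetD_natCast]
  have h0 : is_lms (c :: rest) (((0 : Nat) : Int)) = (c == "S") := by
    simp [is_lms]
  rw [List.length_cons, List.range_succ_eq_map, List.filter_cons]
  rw [List.filter_map]
  have hcomp : ((fun k => is_lms (c :: rest) ((k : Nat) : Int)) ∘ Nat.succ) = lmsAt (c :: rest) := by
    funext k; exact hpt k
  rw [hcomp, h0]
  split_ifs with h <;> simp [List.map_map, Function.comp_def, Nat.succ_eq_add_one]

lemma filter_lmsAt_eq (T : List String) :
    ((List.range (T.length - 1)).filter (lmsAt T)).map (fun k : Nat => (k : Int) + 1) = (descLMS T).reverse := by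
  induction T with
  | nil => simp [descLMS]
  | cons c rest ih =>
    cases rest with
    | nil => simp [descLMS]
    | cons c' r =>
      have hpt : ∀ k : Nat, lmsAt (c :: c' :: r) (k + 1) = lmsAt (c' :: r) k := by
        intro k; simp [lmsAt]
      have h0 : lmsAt (c :: c' :: r) 0 = (c == "L" && c' == "S") := by simp [lmsAt]
      have hlen : (c :: c' :: r).length - 1 = r.length + 1 := by simp
      rw [hlen, List.range_succ_eq_map, List.filter_cons, List.filter_map]
      have hcomp : (lmsAt (c :: c' :: r) ∘ Nat.succ) = lmsAt (c' :: r) := by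
        funext k; exact hpt k
      rw [hcomp, h0]
      have hlen' : (c' :: r).length - 1 = r.length := by simp
      rw [hlen'] at ih
      simp only [descLMS, List.reverse_append] at *
      split_ifs with h <;>
        simp [List.map_map, Function.comp_def, Nat.succ_eq_add_one] <;>
        rw [← List.map_reverse, ← ih, List.map_map] <;> rfl

-- ===== VERDICT (by name: the statement is the Claim_ definition above) =====
theorem classify_ls_spec : Claim_equal_classify_ls := by
  intro S _ hpre
  obtain ⟨x, r, rfl⟩ := List.exists_cons_of_ne_nil hpre
  unfold Spec_classify_ls classify_ls classify_ls_alt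
  simp only [if_neg (List.cons_ne_nil x r), PySem.List.slice_from_one]
  have hpos : ((x :: r).length : Int) - 1 = 0 + (r.length : Int) := by
    simp only [List.length_cons]; push_cast; ring
  rw [hpos, fold_inv x r 0]
  obtain ⟨c, rest, hT⟩ := List.exists_cons_of_ne_nil (classifyT_ne_nil x r)
  have hprev : PySem.List.pyGetD ((c :: rest).reverse) (-1) "" = c := by
    simp [List.reverse_cons, PySem.List.pyGetD_neg_one_append_singleton]
  simp only [hT, hprev, List.reverse_reverse]
  have hmap0 : (descLMS (c :: rest)).map (· + (0 : Int)) = descLMS (c :: rest) := by simp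
  rw [hmap0]
  refine Prod.ext rfl ?_
  have hn : ((x :: r).length : Int) = (((c :: rest).length : Nat) : Int) := by
    rw [← hT, classifyT_length]
  rw [hn, PySem.List.pyRange_zero_natCast, List.filter_map]
  have hcast : ((fun i => is_lms (c :: rest) i) ∘ (fun k : Nat => (k : Int)))
      = fun k : Nat => is_lms (c :: rest) ((k : Nat) : Int) := rfl
  rw [hcast, filter_lms_shift]
  have hlen : rest.length = (c :: rest).length - 1 := by simp
  rw [hlen, filter_lmsAt_eq]
  split_ifs with h <;> simp
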